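-- pv_equiv track=rewrite | github.com/qiyueming/LAMP_Primers | Covid_primer_design/inclusivity.py | determine_mutation
-- ===== SOURCE A (Python) =====
-- def determine_mutation(s,align,reverse=True):
--     """
--     s is the primer sequence, align is the fragment in align.
--     reverse = True if this is for LFc or B1c ...
--     so that will check homology distance to 5' end.
--     """
--     if reverse:
--         s = s[::-1]
--         align = align[::-1]
--     f=[]
--     t=[]
--     pos=0
--     append=False
--     for k,(i,j) in enumerate(zip(s,align)):
--         if i==j:
--             append=False
--             continue
--         else:
--             pos = k
--             if append:
--                 f[-1]+=i
--                 t[-1]+=j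
--             else:
--                 f.append(i)
--                 t.append(j)
--             append=True
--     return ','.join( f"{a}->{b}" for a,b in zip(f,t) ), len(s) - 1 - pos
-- ===== SOURCE B (Python) =====
-- def determine_mutation(s, align, reverse=True):
--     if reverse:
--         s = s[::-1]
--         align = align[::-1]
--     n = min(len(s), len(align))
--     segments = []
--     pos = 0
--     k = 0
--     while k < n:
--         if s[k] == align[k]:
--             k += 1
--             continue
--         start = k
--         while k < n and s[k] != align[k]:
--             k += 1
--         segments.append(s[start:k] + "->" + align[start:k])
--         pos = k - 1
--     return ",".join(segments), len(s) - 1 - pos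
-- ===== Notes on version B (the rewrite author's own statement) =====
-- stated objective: alternative
-- what changed: Replaces A's per-character state machine (append flag, parallel f/t lists mutated at [-1], final zip-join) by an index-based run scan: skip the matching prefix, consume each whole mismatch run with an inner loop, slice out the two run substrings into one 'a->b' segment directly, and set pos to the run's last index.
import Mathlib
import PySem

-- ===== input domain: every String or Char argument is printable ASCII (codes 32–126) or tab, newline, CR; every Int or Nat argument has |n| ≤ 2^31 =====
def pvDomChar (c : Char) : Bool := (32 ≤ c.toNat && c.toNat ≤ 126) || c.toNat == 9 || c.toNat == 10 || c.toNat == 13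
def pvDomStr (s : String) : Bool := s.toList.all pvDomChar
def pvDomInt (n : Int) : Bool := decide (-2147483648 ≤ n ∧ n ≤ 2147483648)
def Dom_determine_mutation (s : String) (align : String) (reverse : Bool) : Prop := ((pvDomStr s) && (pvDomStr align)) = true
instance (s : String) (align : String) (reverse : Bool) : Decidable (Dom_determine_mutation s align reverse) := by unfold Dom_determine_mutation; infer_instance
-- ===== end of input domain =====

-- B replaces A's per-character append-flag state machine by a run scan (skip the
-- matching prefix, consume each whole mismatch run at once); objective: alternative.

-- ===== PORT A =====
-- Python "f[-1] += i": append char c to the last string of f (f is nonempty whenever A runs it)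
def pvAddLast : List String → Char → List String
  | [], _ => []
  | [x], c => [x.push c]
  | x :: xs, c => x :: pvAddLast xs c

-- the for-loop over enumerate(zip(s,align)); k is the enumerate counter,
-- state (f, t, pos, append) exactly as in A
def pvAFold : List (Char × Char) → Nat → List String → List String → Int → Bool →
    List String × List String × Int
  | [], _, f, t, pos, _ => (f, t, pos)
  | (i, j) :: rest, k, f, t, pos, app =>
    if i == j then
      pvAFold rest (k + 1) f t pos false
    else if app then
      pvAFold rest (k + 1) (pvAddLast f i) (pvAddLast t j) (k : Int) true
    else
      pvAFold rest (k + 1) (f ++ [String.ofList [i]]) (t ++ [String.ofList [j]]) (k : Int) true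

def determine_mutation (s : String) (align : String) (reverse : Bool) : String × Int :=
  let sc := if reverse then s.toList.reverse else s.toList
  let ac := if reverse then align.toList.reverse else align.toList
  let r := pvAFold (sc.zip ac) 0 [] [] 0 false
  (String.intercalate "," ((r.1.zip r.2.1).map fun p => p.1 ++ "->" ++ p.2),
   (sc.length : Int) - 1 - r.2.2)

-- ===== PORT B =====
def pvMism (p : Char × Char) : Bool := p.1 != p.2

-- B's outer while-loop: skip matches; on a mismatch take the whole mismatch run
-- (the inner while = takeWhile/dropWhile), emit one "a->b" segment, set pos to the run's end
def pvBLoop : List (Char × Char) → Nat → Int → List String → List String × Int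
  | [], _, pos, segs => (segs, pos)
  | (i, j) :: rest, k, pos, segs =>
    if i == j then
      pvBLoop rest (k + 1) pos segs
    else
      let run := List.takeWhile pvMism ((i, j) :: rest)
      pvBLoop (List.dropWhile pvMism ((i, j) :: rest)) (k + run.length)
        ((k : Int) + run.length - 1)
        (segs ++ [String.ofList (run.map Prod.fst) ++ "->" ++ String.ofList (run.map Prod.snd)])
  termination_by l => l.length
  decreasing_by
    · simp
    · have hm : pvMism (i, j) = true := by simp_all [pvMism]
      have hd : List.dropWhile pvMism ((i, j) :: rest) = List.dropWhile pvMism rest := by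
        simp [List.dropWhile, hm]
      rw [hd]
      simp only [List.length_cons]
      exact Nat.lt_succ_of_le (List.length_dropWhile_le _ _)

def determine_mutation_alt (s : String) (align : String) (reverse : Bool) : String × Int :=
  let sc := if reverse then s.toList.reverse else s.toList
  let ac := if reverse then align.toList.reverse else align.toList
  let r := pvBLoop (sc.zip ac) 0 0 []
  (String.intercalate "," r.1, (sc.length : Int) - 1 - r.2)

-- ===== PRECONDITION & SPEC =====
def Spec_determine_mutation (s : String) (align : String) (reverse : Bool) (out : String × Int) : Prop := out = determine_mutation_alt s align reverse
instance (s : String) (align : String) (reverse : Bool) (out : String × Int) : Decidable (Spec_determine_mutation s align reverse out) := by unfold Spec_determine_mutation; infer_instance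

-- ===== CLAIM (what is proved, stated in full; the proofs are below) =====
def Claim_equal_determine_mutation : Prop := ∀ (s : String) (align : String) (reverse : Bool), Dom_determine_mutation s align reverse → Spec_determine_mutation s align reverse (determine_mutation s align reverse)

-- ===== LEMMAS AND PROOFS =====

theorem pvBLoop_nil (k : Nat) (pos : Int) (segs : List String) :
    pvBLoop [] k pos segs = (segs, pos) := by
  rw [pvBLoop]

theorem pvBLoop_cons_eq (i j : Char) (rest : List (Char × Char)) (k : Nat) (pos : Int)
    (segs : List String) (h : (i == j) = true) :
    pvBLoop ((i, j) :: rest) k pos segs = pvBLoop rest (k + 1) pos segs := by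
  rw [pvBLoop]; simp [h]

theorem pvBLoop_cons_ne (i j : Char) (rest : List (Char × Char)) (k : Nat) (pos : Int)
    (segs : List String) (h : (i == j) = false) :
    pvBLoop ((i, j) :: rest) k pos segs =
      pvBLoop (List.dropWhile pvMism rest) (k + 1 + (List.takeWhile pvMism rest).length)
        ((k : Int) + (1 + (List.takeWhile pvMism rest).length) - 1)
        (segs ++ [String.ofList (i :: (List.takeWhile pvMism rest).map Prod.fst) ++ "->" ++
                  String.ofList (j :: (List.takeWhile pvMism rest).map Prod.snd)]) := by
  have hm : pvMism (i, j) = true := by simp_all [pvMism]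
  rw [pvBLoop]
  simp only [h, Bool.false_eq_true, if_false, List.takeWhile, List.dropWhile, hm,
    List.length_cons, List.map_cons]
  generalize (List.takeWhile pvMism rest).length = m
  rw [show k + (m + 1) = k + 1 + m from by omega]
  rw [show ((k : Int) + ↑(m + 1) - 1) = ((k : Int) + (1 + ↑m) - 1) from by push_cast; ring]

theorem pvAddLast_append (f : List String) (x : String) (c : Char) :
    pvAddLast (f ++ [x]) c = f ++ [x.push c] := by
  induction f with
  | nil => rfl
  | cons a as ih =>
    cases as with
    | nil => simp [pvAddLast]
    | cons b bs => simpa [pvAddLast] using ih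

-- A's loop in append=true state consumes exactly the current mismatch run
theorem pvAFold_true (l : List (Char × Char)) :
    ∀ (k : Nat) (f t : List String) (pos : Int) (a b : String),
    pvAFold l k (f ++ [a]) (t ++ [b]) pos true =
      pvAFold (l.dropWhile pvMism) (k + (l.takeWhile pvMism).length)
        (f ++ [a ++ String.ofList ((l.takeWhile pvMism).map Prod.fst)])
        (t ++ [b ++ String.ofList ((l.takeWhile pvMism).map Prod.snd)])
        (if (l.takeWhile pvMism).length = 0 then pos
         else ((k : Int) + (l.takeWhile pvMism).length - 1)) false := by
  induction l with
  | nil => intro k f t pos a b; simp [pvAFold]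
  | cons hd rest ih =>
    intro k f t pos a b
    obtain ⟨i, j⟩ := hd
    by_cases hij : i = j
    · simp [pvAFold, hij, List.takeWhile, List.dropWhile, pvMism]
    · have hm : pvMism (i, j) = true := by simp [pvMism, hij]
      have hne : (i == j) = false := by simp [hij]
      simp only [pvAFold, hne, Bool.false_eq_true, if_false, if_true,
        List.takeWhile, List.dropWhile, hm, List.map_cons, List.length_cons,
        Nat.add_one_ne_zero]
      rw [pvAddLast_append, pvAddLast_append, ih]
      have h1 : a.push i ++ String.ofList ((rest.takeWhile pvMism).map Prod.fst) =
          a ++ String.ofList (i :: (rest.takeWhile pvMism).map Prod.fst) := by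
        apply String.ext; simp
      have h2 : b.push j ++ String.ofList ((rest.takeWhile pvMism).map Prod.snd) =
          b ++ String.ofList (j :: (rest.takeWhile pvMism).map Prod.snd) := by
        apply String.ext; simp
      rw [h1, h2]
      generalize (List.takeWhile pvMism rest).length = m
      rw [show k + 1 + m = k + (m + 1) from by omega]
      rw [show (if m = 0 then (k : Int) else ((k + 1 : Nat) : Int) + (m : Int) - 1) =
            ((k : Int) + ((m + 1 : Nat) : Int) - 1) from by split_ifs <;> push_cast <;> omega]

-- main invariant: A's loop from append=false state, joined, equals B's loop
theorem pvMain (n : Nat) : ∀ (l : List (Char × Char)), l.length ≤ n →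
    ∀ (k : Nat) (f t : List String) (pos : Int), f.length = t.length →
    (((pvAFold l k f t pos false).1.zip (pvAFold l k f t pos false).2.1).map
        (fun p => p.1 ++ "->" ++ p.2),
     (pvAFold l k f t pos false).2.2) =
    pvBLoop l k pos ((f.zip t).map fun p => p.1 ++ "->" ++ p.2) := by
  induction n with
  | zero =>
    intro l hl k f t pos hlen
    have : l = [] := by cases l <;> simp_all
    subst this; simp [pvAFold, pvBLoop_nil]
  | succ n ih =>
    intro l hl k f t pos hlen
    cases l with
    | nil => simp [pvAFold, pvBLoop_nil]
    | cons hd rest =>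
      obtain ⟨i, j⟩ := hd
      by_cases hij : i = j
      · have hne : (i == j) = true := by simp [hij]
        simp only [pvAFold, hne, if_true, pvBLoop_cons_eq _ _ _ _ _ _ hne]
        exact ih rest (by simp at hl; omega) _ f t pos hlen
      · have hne : (i == j) = false := by simp [hij]
        simp only [pvAFold, hne, Bool.false_eq_true, if_false,
          pvBLoop_cons_ne _ _ _ _ _ _ hne]
        rw [pvAFold_true]
        have hrest : (rest.dropWhile pvMism).length ≤ n := by
          have := List.length_dropWhile_le pvMism rest
          simp at hl; omega
        rw [ih _ hrest _ _ _ _ (by simp [hlen])]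
        have hzip : ((f ++ [String.ofList [i] ++ String.ofList ((rest.takeWhile pvMism).map Prod.fst)]).zip
            (t ++ [String.ofList [j] ++ String.ofList ((rest.takeWhile pvMism).map Prod.snd)])).map
              (fun p => p.1 ++ "->" ++ p.2) =
            ((f.zip t).map fun p => p.1 ++ "->" ++ p.2) ++
            [String.ofList (i :: (rest.takeWhile pvMism).map Prod.fst) ++ "->" ++
             String.ofList (j :: (rest.takeWhile pvMism).map Prod.snd)] := by
          rw [List.zip_append hlen]
          simp only [List.map_append, List.zip_cons_cons, List.zip_nil_right, List.map_cons,
            List.map_nil]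
          congr 3 <;> (apply String.ext; simp)
        rw [hzip]
        congr 1
        all_goals omega

-- ===== VERDICT (by name: the statement is the Claim_ definition above) =====
theorem determine_mutation_spec : Claim_equal_determine_mutation := by
  intro s align reverse _
  unfold Spec_determine_mutation determine_mutation determine_mutation_alt
  have h := pvMain ((if reverse then s.toList.reverse else s.toList).zip
      (if reverse then align.toList.reverse else align.toList)).length
      _ le_rfl 0 [] [] 0 rfl
  simp only [List.zip_nil_right, List.map_nil] at h
  have h1 := congrArg Prod.fst h
  have h2 := congrArg Prod.snd h
  simp only at h1 h2
  simp only [h1, h2]
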